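-- pv_equiv track=rewrite | github.com/KyleSpicer/advent_of_code | 2018/day2/day2.py | get_shortest_item_length
-- ===== SOURCE A (Python) =====
-- def get_shortest_item_length(squished_list: list):
--
--     shortest = []
--     diff = 10
--
--     for item in enumerate(squished_list):
--         if len(item[1][2]) < diff:
--             diff = len(item[1][2])
--             shortest = []
--             shortest.append(item)
--
--     return diff, shortest
-- ===== SOURCE B (Python) =====
-- def get_shortest_item_length(squished_list: list):
--     # filter-then-stable-sort: candidates strictly under the 10 cap, first minimum wins
--     candidates = [(i, el) for i, el in enumerate(squished_list) if len(el[2]) < 10]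
--     if not candidates:
--         return 10, []
--     candidates.sort(key=lambda p: len(p[1][2]))
--     best = candidates[0]
--     return len(best[1][2]), [best]
-- ===== Notes on version B (the rewrite author's own statement) =====
-- stated objective: alternative
-- what changed: A's fused single-pass running-minimum fold is replaced by a filter of (index, element) candidates with third-field length < 10 followed by a stable sort on that length, taking the head (first minimum) or (10, []) when no candidate exists.
import Mathlib
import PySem

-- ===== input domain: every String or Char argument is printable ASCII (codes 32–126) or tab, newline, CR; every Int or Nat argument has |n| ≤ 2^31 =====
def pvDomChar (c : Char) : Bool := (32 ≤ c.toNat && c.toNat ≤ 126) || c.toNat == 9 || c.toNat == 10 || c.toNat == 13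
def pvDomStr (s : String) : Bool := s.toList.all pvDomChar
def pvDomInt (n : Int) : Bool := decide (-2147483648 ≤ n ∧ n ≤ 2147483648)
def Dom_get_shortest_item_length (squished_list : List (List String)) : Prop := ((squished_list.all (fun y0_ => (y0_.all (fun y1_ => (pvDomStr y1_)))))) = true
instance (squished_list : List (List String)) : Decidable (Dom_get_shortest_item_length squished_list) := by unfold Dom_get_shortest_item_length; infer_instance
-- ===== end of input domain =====

-- B replaces A's fused single-pass running-minimum with a filter-then-stable-sort decomposition
-- (candidates under the 10 cap, stable sort by third-field length, take the first); same result, no speed claim.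

-- ===== PORT A =====
-- A: single left fold over enumerate with state (diff, shortest); item[1][2] is ported as
-- pyGetD item.2 2 "" — exact under Pre_ (inner lists of length ≥ 3; Python raises IndexError otherwise).
def get_shortest_item_length (squished_list : List (List String)) : Int × (List (Int × List String)) :=
  (PySem.List.enumerate squished_list 0).foldl
    (fun st item =>
      if PySem.Str.len (PySem.List.pyGetD item.2 2 "") < st.1 then
        (PySem.Str.len (PySem.List.pyGetD item.2 2 ""), [item])
      else st)
    ((10 : Int), ([] : List (Int × List String)))

-- ===== PORT B =====
-- B: build candidate (index, element) pairs whose third-field length is < 10, stable-sort them by that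
-- length, return the head; Python's 'if not candidates' test is the [] branch of the match
-- (sorted of [] is [] and conversely, so matching on the sorted list is the same test).
def get_shortest_item_length_alt (squished_list : List (List String)) : Int × (List (Int × List String)) :=
  match PySem.List.sorted
      ((PySem.List.enumerate squished_list 0).filter
        (fun p => PySem.Str.len (PySem.List.pyGetD p.2 2 "") < 10))
      (fun p => PySem.Str.len (PySem.List.pyGetD p.2 2 "")) false with
  | [] => (10, [])
  | best :: _ => (PySem.Str.len (PySem.List.pyGetD best.2 2 ""), [best])

-- ===== PRECONDITION & SPEC =====
-- Pre_ excludes exactly the inputs where Python A raises IndexError (an inner list with fewer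
-- than 3 elements, so item[1][2] fails); Python B raises there too.
def Pre_get_shortest_item_length (squished_list : List (List String)) : Prop :=
  ∀ l ∈ squished_list, 3 ≤ l.length
instance (squished_list : List (List String)) : Decidable (Pre_get_shortest_item_length squished_list) := by unfold Pre_get_shortest_item_length; infer_instance
def pvWitness_get_shortest_item_length : List (List String) := [["ab", "cd", "efg"], ["x", "y", "zzzz"]]

def Spec_get_shortest_item_length (squished_list : List (List String)) (out : Int × (List (Int × List String))) : Prop := out = get_shortest_item_length_alt squished_list
instance (squished_list : List (List String)) (out : Int × (List (Int × List String))) : Decidable (Spec_get_shortest_item_length squished_list out) := by unfold Spec_get_shortest_item_length; infer_instance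

-- ===== CLAIM (what is proved, stated in full; the proofs are below) =====
def Claim_equal_get_shortest_item_length : Prop := ∀ (squished_list : List (List String)), Dom_get_shortest_item_length squished_list → Pre_get_shortest_item_length squished_list → Spec_get_shortest_item_length squished_list (get_shortest_item_length squished_list)

-- ===== LEMMAS AND PROOFS =====

-- first element attaining the minimal key (ties resolved to the earlier element)
def pvFmin {α : Type} (k : α → Int) : List α → Option α
  | [] => none
  | p :: rest =>
    match pvFmin k rest with
    | none => some p
    | some q => if k q < k p then some q else some p

-- head of the insertion-sort fold, with c currently at the head of the accumulator
theorem pvHeadFoldIns {α : Type} (k : α → Int) :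
    ∀ (rest : List α) (c : α) (acc : List α),
      (rest.foldl (fun acc x => PySem.List.insertBy (fun a b => decide (k a < k b)) x acc) (c :: acc)).head?
        = some (match pvFmin k rest with | none => c | some r => if k r < k c then r else c) := by
  intro rest
  induction rest with
  | nil => intro c acc; rfl
  | cons q rest' ih =>
    intro c acc
    simp only [List.foldl_cons, PySem.List.insertBy]
    by_cases hqc : k q < k c
    · simp only [hqc, decide_true, if_true]
      rw [ih q (c :: acc)]
      simp only [pvFmin]
      rcases h : pvFmin k rest' with _ | r
      · simp [hqc]
      · by_cases hrq : k r < k q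
        · simp [hrq, show k r < k c by omega]
        · simp [hrq, hqc]
    · simp only [hqc, decide_false, Bool.false_eq_true, if_false]
      rw [ih c (PySem.List.insertBy (fun a b => decide (k a < k b)) q acc)]
      simp only [pvFmin]
      rcases h : pvFmin k rest' with _ | r
      · simp [hqc]
      · by_cases hrq : k r < k q
        · simp [hrq]
        · by_cases hrc : k r < k c
          · omega
          · simp [hrc, hrq, hqc]

-- the head of Python's stable sort is the first minimum
theorem pvSortedHead {α : Type} (k : α → Int) (L : List α) :
    (PySem.List.sorted L k false).head? = pvFmin k L := by
  rw [PySem.List.sorted_eq_foldl_insertBy]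
  cases L with
  | nil => rfl
  | cons c rest =>
    simp only [List.foldl_cons]
    have h1 : PySem.List.insertBy (fun a b => decide (k a < k b)) c [] = [c] := rfl
    rw [h1, pvHeadFoldIns k rest c []]
    simp only [pvFmin]
    rcases pvFmin k rest with _ | r
    · rfl
    by_cases hrc : k r < k c <;> simp [hrc]

-- tightening the filter threshold from d to c ≤ d
theorem pvFminFilter {α : Type} (k : α → Int) (c d : Int) (hcd : c ≤ d) :
    ∀ (L : List α),
      pvFmin k (L.filter (fun p => decide (k p < c)))
        = (pvFmin k (L.filter (fun p => decide (k p < d)))).bind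
            (fun r => if k r < c then some r else none) := by
  intro L
  induction L with
  | nil => rfl
  | cons q L' ih =>
    by_cases hqc : k q < c
    · have hqd : k q < d := by omega
      simp only [List.filter_cons, hqc, hqd, decide_true, if_true, pvFmin]
      rcases h : pvFmin k (L'.filter (fun p => decide (k p < d))) with _ | r
      · rw [h] at ih; simp only [Option.bind_none] at ih
        simp [ih, hqc]
      · rw [h] at ih; simp only [Option.bind_some] at ih
        by_cases hrq : k r < k q
        · simp [ih, hrq, show k r < c by omega]
        · by_cases hrc : k r < c
          · simp [ih, hrc, hrq, hqc]
          · simp [ih, hrc, hrq, hqc]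
    · by_cases hqd : k q < d
      · simp only [List.filter_cons, hqc, hqd, decide_true, decide_false, if_true,
          Bool.false_eq_true, if_false, pvFmin]
        rcases h : pvFmin k (L'.filter (fun p => decide (k p < d))) with _ | r
        · rw [h] at ih; simp only [Option.bind_none] at ih
          simp [ih, hqc]
        · rw [h] at ih; simp only [Option.bind_some] at ih
          by_cases hrq : k r < k q
          · simp [hrq, ih]
          · have hrc : ¬ k r < c := by omega
            simp [hrq, hqc, ih, hrc]
      · simp only [List.filter_cons, hqc, hqd, decide_false, Bool.false_eq_true, if_false]
        exact ih

-- A's left fold with running threshold d equals the first minimum among elements below d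
theorem pvFoldChar {α : Type} (k : α → Int) :
    ∀ (L : List α) (d : Int) (s : List α),
      L.foldl (fun st item => if k item < st.1 then (k item, [item]) else st) (d, s)
        = (match pvFmin k (L.filter (fun p => decide (k p < d))) with
           | none => (d, s)
           | some p => (k p, [p])) := by
  intro L
  induction L with
  | nil => intro d s; rfl
  | cons q L' ih =>
    intro d s
    by_cases hq : k q < d
    · simp only [List.foldl_cons, hq, if_true, List.filter_cons, decide_true, pvFmin]
      rw [ih (k q) [q], pvFminFilter k (k q) d (by omega) L']
      rcases h : pvFmin k (L'.filter (fun p => decide (k p < d))) with _ | r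
      · simp
      · by_cases hrq : k r < k q
        · simp [hrq]
        · simp [hrq]
    · simp only [List.foldl_cons, hq, if_false, List.filter_cons, decide_false]
      exact ih d s

-- ===== VERDICT (by name: the statement is the Claim_ definition above) =====
theorem get_shortest_item_length_spec : Claim_equal_get_shortest_item_length := by
  intro xs _ _
  unfold Spec_get_shortest_item_length get_shortest_item_length get_shortest_item_length_alt
  rw [pvFoldChar (fun p : Int × List String => PySem.Str.len (PySem.List.pyGetD p.2 2 "")) (PySem.List.enumerate xs 0) 10 []]
  rcases h : PySem.List.sorted
      ((PySem.List.enumerate xs 0).filter (fun p => PySem.Str.len (PySem.List.pyGetD p.2 2 "") < 10))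
      (fun p => PySem.Str.len (PySem.List.pyGetD p.2 2 "")) false with _ | ⟨b, t⟩
  · have hnil := (PySem.List.sorted_eq_nil_iff _ _ _).mp h
    rw [hnil]
    rfl
  · have hh := pvSortedHead (fun p : Int × List String => PySem.Str.len (PySem.List.pyGetD p.2 2 ""))
      ((PySem.List.enumerate xs 0).filter (fun p => PySem.Str.len (PySem.List.pyGetD p.2 2 "") < 10))
    rw [h] at hh
    simp only [List.head?_cons] at hh
    rw [h, ← hh]
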